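-- pv_equiv track=rewrite | github.com/Eric-is-good/cpu-compilation | python_for_compilation/cpu_compilation.py | binary_to_hex
-- ===== SOURCE A (Python) =====
-- def binary_to_hex(binary):
--     binary = binary.replace('_', '')
--     hexstr = ""
--     if len(binary) % 4 != 0:
--         raise Exception("Binary length must be multiple of 4")
--     else:
--         for i in range(0, len(binary), 4):
--             hex1 = hex(int(binary[i: i + 4], 2))[2:]
--             hexstr = hexstr + hex1
--         return hexstr
-- ===== SOURCE B (Python) =====
-- def binary_to_hex(binary):
--     binary = binary.replace('_', '')
--     if len(binary) % 4 != 0: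
--         raise Exception("Binary length must be multiple of 4")
--     if not binary:
--         return ""
--     return format(int(binary, 2), 'x').zfill(len(binary) // 4)
-- ===== Notes on version B (the rewrite author's own statement) =====
-- stated objective: simpler
-- what changed: Replaces the per-nibble loop (slice each 4-bit chunk, parse it with int, take the hex digit, concatenate) with one closed-form conversion: the whole stripped string is parsed by a single int(binary, 2) call, hex-formatted, and zfill-padded back to one digit per nibble.
-- outside the precondition, e.g. on binary_to_hex('-101'): A returns 'x5', B returns '-5'
import Mathlib
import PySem

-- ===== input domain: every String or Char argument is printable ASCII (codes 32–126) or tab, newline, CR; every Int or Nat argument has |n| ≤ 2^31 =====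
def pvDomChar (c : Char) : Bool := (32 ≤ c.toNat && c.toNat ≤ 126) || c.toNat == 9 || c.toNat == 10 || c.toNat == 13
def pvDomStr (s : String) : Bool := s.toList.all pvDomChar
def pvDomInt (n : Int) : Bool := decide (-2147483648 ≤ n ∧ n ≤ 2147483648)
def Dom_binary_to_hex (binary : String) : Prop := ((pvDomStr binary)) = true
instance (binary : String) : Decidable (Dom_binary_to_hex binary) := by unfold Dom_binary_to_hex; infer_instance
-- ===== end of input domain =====

-- B replaces A's per-nibble loop by one whole-string binary-to-int conversion,
-- hex-formatted and zero-padded back to one digit per nibble (objective: simpler).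


-- ===== PORT A =====
-- int(cs, 2) for strings made of '0'/'1' only (exact there; Pre_ guarantees every
-- parsed chunk is such a string — Python's int() also tolerates sign/whitespace,
-- excluded by Pre_).
def bitVal? (c : Char) : Option Nat :=
  if c = '0' then some 0 else if c = '1' then some 1 else none

def parseBinAux : Nat → List Char → Option Nat
  | acc, [] => some acc
  | acc, c :: cs =>
    match bitVal? c with
    | some b => parseBinAux (2 * acc + b) cs
    | none => none

def parseBin? (cs : List Char) : Option Nat :=
  if cs = [] then none else parseBinAux 0 cs

-- hex digits of n, lowercase, no leading zeros (one zero digit for n = 0);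
-- Python's hex(n) for n ≥ 0 is these digits behind the two-character 0x prefix
def hexRep (n : Nat) : List Char :=
  if h : n < 16 then [Nat.digitChar n]
  else hexRep (n / 16) ++ [Nat.digitChar (n % 16)]
decreasing_by exact Nat.div_lt_self (by omega) (by omega)

def binary_to_hex (binary : String) : String :=
  let b := (PySem.Str.replace binary "_" "").toList
  if b.length % 4 ≠ 0 then ""  -- Python raises Exception here; excluded by Pre_
  else
    String.mk ((PySem.List.pyRange 0 b.length 4).foldl (fun hexstr i =>
      match parseBin? (PySem.List.slice b (some i) (some (i + 4))) with
      | some m => hexstr ++ PySem.List.slice ('0' :: 'x' :: hexRep m) (some 2) none  -- hex(m)[2:]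
      | none => hexstr  -- int() raises ValueError; unreachable under Pre_
      ) [])

-- ===== PORT B =====
def binary_to_hex_alt (binary : String) : String :=
  let b := (PySem.Str.replace binary "_" "").toList
  if b.length % 4 ≠ 0 then ""  -- raise Exception; excluded by Pre_
  else if b = [] then ""
  else
    match parseBin? b with
    | some n => String.mk (PySem.Chars.zfill (hexRep n) (PySem.Int.floordiv b.length 4))
    | none => ""  -- int() raises ValueError; excluded by Pre_

-- ===== PRECONDITION & SPEC =====
-- Pre_ admits exactly the binary-literal strings: digits '0'/'1' plus '_' separators,
-- with a multiple of 4 digits. It excludes inputs on which A raises (wrong digit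
-- count, or a nibble chunk int(·,2) rejects) and also the rare inputs whose nibble
-- chunks carry a sign or whitespace character that Python's int(·,2) tolerates:
-- there A's chunk-wise slicing yields accidental values (see the cited example
-- "-101", where A slices the hex of a negative nibble) that B's whole-string
-- conversion does not reproduce.
def Pre_binary_to_hex (binary : String) : Prop :=
  (binary.toList.all (fun c => c == '0' || c == '1' || c == '_')) = true ∧
  (binary.toList.filter (fun c => c ≠ '_')).length % 4 = 0
instance (binary : String) : Decidable (Pre_binary_to_hex binary) := by
  unfold Pre_binary_to_hex; infer_instance

def pvWitness_binary_to_hex : String := "1010_0001"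

def Spec_binary_to_hex (binary : String) (out : String) : Prop := out = binary_to_hex_alt binary
instance (binary : String) (out : String) : Decidable (Spec_binary_to_hex binary out) := by
  unfold Spec_binary_to_hex; infer_instance

-- ===== CLAIM (what is proved, stated in full; the proofs are below) =====
def Claim_equal_binary_to_hex : Prop := ∀ (binary : String), Dom_binary_to_hex binary → Pre_binary_to_hex binary → Spec_binary_to_hex binary (binary_to_hex binary)

-- ===== LEMMAS AND PROOFS =====
def bitN (c : Char) : Nat := if c = '1' then 1 else 0
def val (cs : List Char) : Nat := cs.foldl (fun n c => 2 * n + bitN c) 0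

lemma foldl_val (cs : List Char) : ∀ a : Nat,
    cs.foldl (fun n c => 2 * n + bitN c) a = a * 2 ^ cs.length + val cs := by
  induction cs with
  | nil => intro a; simp [val]
  | cons c cs ih =>
    intro a
    simp only [List.foldl_cons, List.length_cons, val]
    rw [ih (2 * a + bitN c), ih (2 * 0 + bitN c)]
    ring

lemma val_append (xs ys : List Char) : val (xs ++ ys) = val xs * 2 ^ ys.length + val ys := by
  simp only [val, List.foldl_append]
  rw [foldl_val ys]; rfl

lemma val_lt (cs : List Char) : val cs < 2 ^ cs.length := by
  induction cs with
  | nil => simp [val]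
  | cons c cs ih =>
    show val (c :: cs) < 2 ^ (c :: cs).length
    simp only [val, List.foldl_cons, List.length_cons]
    rw [foldl_val]
    have hb : bitN c ≤ 1 := by unfold bitN; split <;> omega
    have : (2 * 0 + bitN c) * 2 ^ cs.length ≤ 2 ^ cs.length := by
      calc (2 * 0 + bitN c) * 2 ^ cs.length ≤ 1 * 2 ^ cs.length := by
            exact Nat.mul_le_mul_right _ (by omega)
        _ = 2 ^ cs.length := by ring
    calc (2 * 0 + bitN c) * 2 ^ cs.length + val cs < 2 ^ cs.length + 2 ^ cs.length := by
          omega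
      _ = 2 ^ (cs.length + 1) := by ring

lemma parseBinAux_bits (cs : List Char) (h : ∀ c ∈ cs, c = '0' ∨ c = '1') : ∀ a : Nat,
    parseBinAux a cs = some (cs.foldl (fun n c => 2 * n + bitN c) a) := by
  induction cs with
  | nil => intro a; simp [parseBinAux]
  | cons c cs ih =>
    intro a
    have hc := h c (by simp)
    have hrest : ∀ c ∈ cs, c = '0' ∨ c = '1' := fun c hm => h c (by simp [hm])
    rcases hc with hc | hc <;>
      simp [parseBinAux, bitVal?, hc, bitN, ih hrest]

lemma parseBin_bits (cs : List Char) (hne : cs ≠ []) (h : ∀ c ∈ cs, c = '0' ∨ c = '1') :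
    parseBin? cs = some (val cs) := by
  simp [parseBin?, hne, parseBinAux_bits cs h 0, val]

lemma digitChar_ne_sign (m : Nat) : Nat.digitChar m ≠ '+' ∧ Nat.digitChar m ≠ '-' := by
  by_cases h : m < 16
  · interval_cases m <;> exact ⟨by decide, by decide⟩
  · have hs : Nat.digitChar m = '*' := by
      unfold Nat.digitChar
      repeat rw [if_neg (by omega)]
    rw [hs]; exact ⟨by decide, by decide⟩


lemma hexRep_small (n : Nat) (h : n < 16) : hexRep n = [Nat.digitChar n] := by
  rw [hexRep]; simp [h]

lemma hexRep_head (n : Nat) : ∃ d rest, hexRep n = d :: rest ∧ d ≠ '+' ∧ d ≠ '-' := by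
  induction n using Nat.strong_induction_on with
  | _ n ih =>
    by_cases h : n < 16
    · exact ⟨Nat.digitChar n, [], by rw [hexRep_small n h], (digitChar_ne_sign n).1,
        (digitChar_ne_sign n).2⟩
    · obtain ⟨d, rest, hd, h1, h2⟩ := ih (n / 16) (Nat.div_lt_self (by omega) (by omega))
      refine ⟨d, rest ++ [Nat.digitChar (n % 16)], ?_, h1, h2⟩
      rw [hexRep]; simp [h, hd]

lemma zfill_no_sign (cs : List Char) (k : Nat) (d : Char) (rest : List Char)
    (hcs : cs = d :: rest) (h1 : d ≠ '+') (h2 : d ≠ '-') :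
    PySem.Chars.zfill cs (k : Int) = List.replicate (k - cs.length) '0' ++ cs := by
  unfold PySem.Chars.zfill
  by_cases hle : (k : Int) ≤ cs.length
  · have : k - cs.length = 0 := by omega
    simp [hle, this]
  · subst hcs
    simp only [if_neg hle]
    have hsign : ¬ (d = '+' ∨ d = '-') := by tauto
    simp [hsign, Int.toNat_natCast]

def hexFix : Nat → Nat → List Char
  | 0, _ => []
  | k + 1, n => hexFix k (n / 16) ++ [Nat.digitChar (n % 16)]

lemma hexFix_eq (k : Nat) (hk : 1 ≤ k) : ∀ N : Nat, N < 16 ^ k →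
    hexFix k N = List.replicate (k - (hexRep N).length) '0' ++ hexRep N := by
  induction k with
  | zero => omega
  | succ k ih =>
    intro N hN
    by_cases hk0 : k = 0
    · subst hk0
      have hN16 : N < 16 := by simpa using hN
      simp [hexFix, hexRep_small N hN16, Nat.mod_eq_of_lt hN16]
    · have hk1 : 1 ≤ k := by omega
      by_cases hsmall : N < 16
      · have hdiv : N / 16 = 0 := Nat.div_eq_of_lt hsmall
        have h0 : hexFix k 0 = List.replicate (k - 1) '0' ++ ['0'] := by
          have := ih hk1 0 (by positivity)
          simpa [hexRep_small 0 (by omega), Nat.digitChar] using this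
        show hexFix k (N / 16) ++ [Nat.digitChar (N % 16)] = _
        rw [hdiv, h0, Nat.mod_eq_of_lt hsmall, hexRep_small N hsmall]
        have hrepl : List.replicate (k - 1) '0' ++ ['0'] = List.replicate k '0' := by
          rw [← List.replicate_succ']
          congr 1
          omega
        rw [hrepl]
        norm_num
      · have hge : 16 ≤ N := by omega
        have hdivlt : N / 16 < 16 ^ k := by
          rw [Nat.div_lt_iff_lt_mul (by omega)]
          calc N < 16 ^ (k+1) := hN
            _ = 16 ^ k * 16 := by ring
        have hrep : hexRep N = hexRep (N / 16) ++ [Nat.digitChar (N % 16)] := by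
          rw [hexRep]; simp [hsmall]
        show hexFix k (N / 16) ++ [Nat.digitChar (N % 16)] = _
        rw [ih hk1 (N / 16) hdivlt, hrep]
        rw [List.append_assoc]
        congr 2
        simp only [List.length_append, List.length_cons, List.length_nil]
        omega

lemma chunk_take (b : List Char) (k j : Nat) (hj : j < k) (hlen : b.length = 4 * (k+1)) :
    ((b.take (4*k) ++ b.drop (4*k)).drop (4 * j)).take 4 = ((b.take (4*k)).drop (4 * j)).take 4 := by
  rw [List.drop_append, List.take_append]
  have h1 : ((b.take (4*k)).drop (4 * j)).length = 4*k - 4*j := by simp; omega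
  have h2 : 4 - ((b.take (4*k)).drop (4*j)).length = 0 := by omega
  have h3 : 4 * j - (b.take (4*k)).length = 0 := by simp; omega
  simp [h2, h3]
  omega

lemma A_fold (k : Nat) : ∀ b : List Char, b.length = 4 * k → (∀ c ∈ b, c = '0' ∨ c = '1') →
    (List.range k).foldl (fun hexstr j =>
      match parseBin? ((b.drop (4 * j)).take 4) with
      | some m => hexstr ++ hexRep m
      | none => hexstr) [] = hexFix k (val b) := by
  induction k with
  | zero =>
    intro b hlen _
    have : b = [] := List.eq_nil_of_length_eq_zero (by omega)
    subst this
    simp [hexFix]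
  | succ k ih =>
    intro b hlen hbits
    have hFL : b.take (4*k) ++ b.drop (4*k) = b := List.take_append_drop _ _
    have hFlen : (b.take (4*k)).length = 4*k := by simp; omega
    have hLlen : (b.drop (4*k)).length = 4 := by simp; omega
    have hFbits : ∀ c ∈ b.take (4*k), c = '0' ∨ c = '1' :=
      fun c hc => hbits c (List.mem_of_mem_take hc)
    have hLbits : ∀ c ∈ b.drop (4*k), c = '0' ∨ c = '1' :=
      fun c hc => hbits c (List.mem_of_mem_drop hc)
    rw [List.range_succ, List.foldl_append]
    have hcong : (List.range k).foldl (fun hexstr j =>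
        match parseBin? ((b.drop (4 * j)).take 4) with
        | some m => hexstr ++ hexRep m
        | none => hexstr) ([] : List Char)
      = (List.range k).foldl (fun hexstr j =>
        match parseBin? (((b.take (4*k)).drop (4 * j)).take 4) with
        | some m => hexstr ++ hexRep m
        | none => hexstr) ([] : List Char) := by
      apply PySem.List.foldl_congr_mem
      intro acc j hj
      have hjk : j < k := List.mem_range.mp hj
      have := chunk_take b k j hjk hlen
      rw [hFL] at this
      rw [this]
    rw [hcong, ih (b.take (4*k)) hFlen hFbits]
    have hLne : b.drop (4*k) ≠ [] := by
      intro h; rw [h] at hLlen; simp at hLlen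
    have htake : (b.drop (4*k)).take 4 = b.drop (4*k) :=
      List.take_of_length_le (by omega)
    have hvalL : val (b.drop (4*k)) < 16 := by
      have := val_lt (b.drop (4*k))
      rw [hLlen] at this
      omega
    have hvalb : val b = 16 * val (b.take (4*k)) + val (b.drop (4*k)) := by
      conv_lhs => rw [← hFL]
      rw [val_append, hLlen]
      ring
    simp only [List.foldl_cons, List.foldl_nil, htake,
      parseBin_bits _ hLne hLbits]
    have hdiv : val b / 16 = val (b.take (4*k)) := by omega
    have hmod : val b % 16 = val (b.drop (4*k)) := by omega
    show _ = hexFix k (val b / 16) ++ [Nat.digitChar (val b % 16)]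
    rw [hdiv, hmod, hexRep_small _ hvalL]

lemma replace_go_filter (c : Char) : ∀ (l : List Char) (fuel : Nat) (acc : List Char),
    l.length ≤ fuel →
    PySem.Chars.replace.go [c] [] fuel l acc = acc.reverse ++ l.filter (· ≠ c) := by
  intro l
  induction l with
  | nil =>
    intro fuel acc _
    cases fuel <;> simp [PySem.Chars.replace.go]
  | cons x t ih =>
    intro fuel acc hf
    cases fuel with
    | zero => simp at hf
    | succ fuel =>
      by_cases hx : x = c
      · have hpre : [c].isPrefixOf (x :: t) = true := by simp [List.isPrefixOf, hx]
        rw [PySem.Chars.replace.go]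
        simp only [hpre, if_true]
        rw [show List.drop ([c]).length (x :: t) = t by simp]
        rw [show ([] : List Char).reverse ++ acc = acc by simp]
        rw [ih fuel acc (by simp at hf; omega)]
        simp [hx]
      · have hpre : [c].isPrefixOf (x :: t) = false := by
          simp [List.isPrefixOf]; exact fun h => (hx h.symm).elim
        rw [PySem.Chars.replace.go]
        simp only [hpre]
        rw [if_neg (by simp)]
        rw [ih fuel (x :: acc) (by simp at hf; omega)]
        simp [hx]

lemma replace_filter (cs : List Char) (c : Char) :
    PySem.Chars.replace cs [c] [] = cs.filter (· ≠ c) := by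
  unfold PySem.Chars.replace
  simp only [List.isEmpty_cons, if_false]
  rw [replace_go_filter c cs cs.length [] (le_refl _)]
  simp
lemma slice_two (x y : Char) (xs : List Char) :
    PySem.List.slice (x :: y :: xs) (some 2) none = xs := by
  simp [PySem.List.slice]

lemma slice_chunk (b : List Char) (j : Nat) :
    PySem.List.slice b (some (0 + 4 * (j:Int))) (some (0 + 4 * (j:Int) + 4)) =
      (b.drop (4 * j)).take 4 := by
  rw [show (0 + 4 * (j:Int)) = ((4*j:Nat):Int) by push_cast; ring]
  rw [show ((4*j:Nat):Int) + 4 = ((4*j:Nat):Int) + ((4:Nat):Int) by norm_num]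
  exact PySem.List.slice_natCast_add b (4*j) 4

def idxFun (j : Nat) : Int := 0 + 4 * (j : Int)

lemma pyRange_four (k : Nat) :
    PySem.List.pyRange 0 ((4 * k : Nat) : Int) 4 =
      (List.range k).map idxFun := by
  unfold idxFun
  rw [PySem.List.pyRange_of_pos _ _ (by decide : (0:Int) < 4)]
  have hcount : (if (0:Int) < ((4*k:Nat):Int) then ((((4*k:Nat):Int) - 0 + 4 - 1)/4).toNat else 0) = k := by
    by_cases hk : k = 0
    · subst hk; norm_num
    · rw [if_pos (by push_cast; omega)]
      push_cast
      omega
  rw [hcount]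

theorem main_equiv (binary : String)
    (hPre : Pre_binary_to_hex binary) :
    binary_to_hex binary = binary_to_hex_alt binary := by
  obtain ⟨hchars', hlen4⟩ := hPre
  have hchars : ∀ c ∈ binary.toList, c = '0' ∨ c = '1' ∨ c = '_' := by
    intro c hc
    have := List.all_eq_true.mp hchars' c hc
    simp only [Bool.or_eq_true, beq_iff_eq] at this
    tauto
  unfold binary_to_hex binary_to_hex_alt
  simp only
  have hb : (PySem.Str.replace binary "_" "").toList = binary.toList.filter (· ≠ '_') := by
    rw [PySem.Str.toList_replace]
    exact replace_filter binary.toList '_'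
  rw [hb]
  set b := binary.toList.filter (· ≠ '_') with hbdef
  have hbits : ∀ c ∈ b, c = '0' ∨ c = '1' := by
    intro c hc
    rw [hbdef, List.mem_filter] at hc
    rcases hchars c hc.1 with h | h | h
    · exact Or.inl h
    · exact Or.inr h
    · exfalso; have := hc.2; simp [h] at this
  have hmod : b.length % 4 = 0 := hlen4
  rw [if_neg (by omega)]
  set k := b.length / 4 with hk
  have hblen : b.length = 4 * k := by omega
  by_cases hbe : b = []
  · rw [hbe]
    norm_num [PySem.List.pyRange]
    rfl
  · rw [if_neg hbe]
    have hk1 : 1 ≤ k := by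
      rcases Nat.eq_zero_or_pos k with h | h
      · exfalso; apply hbe; apply List.eq_nil_of_length_eq_zero; omega
      · exact h
    rw [parseBin_bits b hbe hbits]
    -- A side
    rw [show ((b.length : Int)) = ((4 * k : Nat) : Int) by rw [hblen]]
    rw [pyRange_four, List.foldl_map]
    have hcong2 : (List.range k).foldl (fun hexstr j =>
        match parseBin? (PySem.List.slice b (some (idxFun j)) (some (idxFun j + 4))) with
        | some m => hexstr ++ PySem.List.slice ('0' :: 'x' :: hexRep m) (some 2) none
        | none => hexstr) ([] : List Char)
      = (List.range k).foldl (fun hexstr j =>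
        match parseBin? ((b.drop (4 * j)).take 4) with
        | some m => hexstr ++ hexRep m
        | none => hexstr) ([] : List Char) := by
      apply PySem.List.foldl_congr_mem
      intro acc j _
      simp only [idxFun]
      rw [slice_chunk]
      cases parseBin? ((b.drop (4 * j)).take 4) with
      | none => rfl
      | some m =>
        simp only
        obtain ⟨d, rest, hd, _, _⟩ := hexRep_head m
        rw [hd, slice_two]
    rw [hcong2, A_fold k b hblen hbits]
    -- B side
    rw [if_neg (show ¬(b.length % 4 ≠ 0) from by omega)]
    have hfd : PySem.Int.floordiv (((4 * k : Nat)) : Int) 4 = (k : Int) := by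
      unfold PySem.Int.floordiv
      push_cast
      rw [Int.mul_fdiv_cancel_left _ (by omega)]
    show String.mk (hexFix k (val b)) =
      String.mk (PySem.Chars.zfill (hexRep (val b)) (PySem.Int.floordiv (((4 * k : Nat)) : Int) 4))
    rw [hfd]
    obtain ⟨d, rest, hd, h1, h2⟩ := hexRep_head (val b)
    rw [zfill_no_sign _ k d rest hd h1 h2]
    have hvlt : val b < 16 ^ k := by
      have := val_lt b
      rw [hblen] at this
      calc val b < 2 ^ (4 * k) := this
        _ = 16 ^ k := by rw [pow_mul]; norm_num
    rw [hexFix_eq k hk1 (val b) hvlt]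

-- ===== VERDICT (by name: the statement is the Claim_ definition above) =====
theorem binary_to_hex_spec : Claim_equal_binary_to_hex := by
  intro binary _ hPre
  exact main_equiv binary hPre
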